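-- pv_equiv track=rewrite | github.com/wafaast/afefuc-project | src/testcases/highlighter.py | replace_spaces_and_dots
-- ===== SOURCE A (Python) =====
-- def replace_spaces_and_dots(sentence):
-- 	output = ""
-- 	quote = False
--
-- 	for c in sentence:
-- 		if c == '"':
-- 			if quote == False:
-- 				quote = True
-- 			else:
-- 				quote = False
-- 			output += c
-- 		elif c == ' ':
-- 			if quote == True:
-- 				output += "%20"
-- 			else:
-- 				output += c
-- 		elif c == '.':
-- 			if quote == True:
-- 				output += "%2E"
-- 			else:
-- 				output += c
-- 				return output
-- 		else:
-- 			output += c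
--
-- 	return output
-- ===== SOURCE B (Python) =====
-- TRANS = {' ': '%20', '.': '%2E'}
--
-- def replace_spaces_and_dots(sentence):
--     out = []
--     for i, seg in enumerate(sentence.split('"')):
--         if i > 0:
--             out.append('"')
--         if i % 2 == 1:
--             # inside quotes: percent-encode spaces and dots
--             out.append(''.join(TRANS.get(ch, ch) for ch in seg))
--         else:
--             j = seg.find('.')
--             if j != -1:
--                 out.append(seg[:j + 1])
--                 return ''.join(out)
--             out.append(seg)
--     return ''.join(out)
-- ===== Notes on version B (the rewrite author's own statement) =====
-- stated objective: alternative
-- what changed: Replaced the per-character state machine (a quote flag toggled char by char, string concatenation per char) with a split-on-the-double-quote decomposition: odd segments are percent-encoded wholesale, even segments are emitted up to and including the first unquoted dot (early return) or verbatim, with the quote characters re-inserted between segments.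
import Mathlib
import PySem

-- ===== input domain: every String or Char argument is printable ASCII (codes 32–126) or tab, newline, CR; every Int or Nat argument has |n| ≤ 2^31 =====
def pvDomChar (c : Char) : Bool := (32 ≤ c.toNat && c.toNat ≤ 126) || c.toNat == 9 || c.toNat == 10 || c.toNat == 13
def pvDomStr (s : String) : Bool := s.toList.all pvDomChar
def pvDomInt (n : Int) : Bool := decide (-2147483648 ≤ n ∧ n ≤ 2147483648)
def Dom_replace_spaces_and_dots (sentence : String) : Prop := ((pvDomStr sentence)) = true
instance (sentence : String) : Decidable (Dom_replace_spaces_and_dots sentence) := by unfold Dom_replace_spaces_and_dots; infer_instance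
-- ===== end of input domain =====

-- B replaces A's per-character state machine by a split-on-quote decomposition processing whole
-- segments at once (objective: alternative decomposition, same asymptotic cost).

-- ===== PORT A =====
-- literal transliteration of A's loop: accumulator `output`, flag `quote`, early return on
-- an unquoted '.'
def replaceAGo : List Char → Bool → List Char → List Char
  | [], _, output => output
  | c :: rest, quote, output =>
    if c = '"' then
      let quote := if quote = false then true else false
      replaceAGo rest quote (output ++ [c])
    else if c = ' ' then
      if quote = true then replaceAGo rest quote (output ++ ['%', '2', '0'])
      else replaceAGo rest quote (output ++ [c])
    else if c = '.' then
      if quote = true then replaceAGo rest quote (output ++ ['%', '2', 'E'])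
      else output ++ [c]          -- return output
    else replaceAGo rest quote (output ++ [c])

def replace_spaces_and_dots (sentence : String) : String :=
  String.mk (replaceAGo sentence.toList false [])

-- ===== PORT B =====
-- TRANS.get(ch, ch): percent-encoding of one character
def bTrans (ch : Char) : List Char :=
  if ch = ' ' then ['%', '2', '0'] else if ch = '.' then ['%', '2', 'E'] else [ch]

-- sentence.split('"'), ported by hand (exact: Python str.split with a 1-char separator keeps
-- empty pieces, and "".split('"') == [''])
def bSplitQ : List Char → List (List Char)
  | [] => [[]]
  | c :: rest =>
    if c = '"' then [] :: bSplitQ rest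
    else
      match bSplitQ rest with
      | [] => [[c]]               -- unreachable: bSplitQ never returns []
      | h :: t => (c :: h) :: t

-- seg.find('.'), ported by hand (none = Python's -1)
def bFindDot : List Char → Option Nat
  | [] => none
  | c :: rest => if c = '.' then some 0 else (bFindDot rest).map (· + 1)

-- Source B's loop over enumerate(parts): `first` = (i == 0), `inside` = (i % 2 == 1);
-- seg[:j+1] with j ≥ 0 is List.take (j+1) (exact for a nonnegative bound)
def bGo : List (List Char) → Bool → Bool → List Char
  | [], _, _ => []
  | seg :: rest, first, inside =>
    (if first then [] else ['"']) ++
    (if inside then seg.flatMap bTrans ++ bGo rest false (!inside)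
     else
       match bFindDot seg with
       | some j => seg.take (j + 1)          -- return ''.join(out)
       | none => seg ++ bGo rest false (!inside))

def replace_spaces_and_dots_alt (sentence : String) : String :=
  String.mk (bGo (bSplitQ sentence.toList) true false)

-- ===== PRECONDITION & SPEC =====
def Spec_replace_spaces_and_dots (sentence : String) (out : String) : Prop := out = replace_spaces_and_dots_alt sentence
instance (sentence : String) (out : String) : Decidable (Spec_replace_spaces_and_dots sentence out) := by unfold Spec_replace_spaces_and_dots; infer_instance

-- ===== CLAIM (what is proved, stated in full; the proofs are below) =====
def Claim_equal_replace_spaces_and_dots : Prop := ∀ (sentence : String), Dom_replace_spaces_and_dots sentence → Spec_replace_spaces_and_dots sentence (replace_spaces_and_dots sentence)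

-- ===== LEMMAS AND PROOFS =====

-- accumulator-free characterisation of A's loop
def coreA : List Char → Bool → List Char
  | [], _ => []
  | c :: rest, quote =>
    if c = '"' then '"' :: coreA rest (if quote = false then true else false)
    else if c = ' ' then
      (if quote = true then ['%', '2', '0'] else [c]) ++ coreA rest quote
    else if c = '.' then
      if quote = true then '%' :: '2' :: 'E' :: coreA rest quote else [c]
    else c :: coreA rest quote

theorem replaceAGo_eq_core (l : List Char) :
    ∀ (q : Bool) (out : List Char), replaceAGo l q out = out ++ coreA l q := by
  induction l with
  | nil => intro q out; simp [replaceAGo, coreA]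
  | cons c rest ih =>
    intro q out
    by_cases hq : c = '"'
    · simp [replaceAGo, coreA, hq, ih]
    · by_cases hs : c = ' '
      · cases q <;> simp [replaceAGo, coreA, hs, ih]
      · by_cases hd : c = '.'
        · cases q <;> simp [replaceAGo, coreA, hd, ih]
        · simp [replaceAGo, coreA, hq, hs, hd, ih]

theorem bSplitQ_ne_nil (l : List Char) : bSplitQ l ≠ [] := by
  cases l with
  | nil => simp [bSplitQ]
  | cons c rest =>
    simp only [bSplitQ]
    split
    · simp
    · cases h : bSplitQ rest <;> simp

-- the `first` flag only controls the leading '"'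
theorem bGo_false (segs : List (List Char)) (hne : segs ≠ []) (q : Bool) :
    bGo segs false q = '"' :: bGo segs true q := by
  cases segs with
  | nil => exact absurd rfl hne
  | cons seg rest => cases q <;> simp [bGo]

theorem coreA_eq_bGo (l : List Char) :
    ∀ (q : Bool), coreA l q = bGo (bSplitQ l) true q := by
  induction l with
  | nil => intro q; cases q <;> simp [coreA, bSplitQ, bGo, bFindDot]
  | cons c rest ih =>
    intro q
    by_cases hq : c = '"'
    · subst hq
      have h3 := bGo_false (bSplitQ rest) (bSplitQ_ne_nil rest)
      cases q <;>
        simp [coreA, bSplitQ, bGo, bFindDot, ih, h3]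
    · obtain ⟨h, t, hsplit⟩ :
          ∃ h t, bSplitQ rest = h :: t := by
        cases hsp : bSplitQ rest with
        | nil => exact absurd hsp (bSplitQ_ne_nil rest)
        | cons h t => exact ⟨h, t, rfl⟩
      have hcons : bSplitQ (c :: rest) = (c :: h) :: t := by
        simp [bSplitQ, hq, hsplit]
      by_cases hd : c = '.'
      · subst hd
        cases q with
        | false => simp [coreA, hcons, bGo, bFindDot, hq]
        | true =>
          simp [coreA, hcons, bGo, bTrans, ih, hsplit]
      · cases q with
        | true =>
          by_cases hs : c = ' '
          · subst hs; simp [coreA, hcons, bGo, bTrans, ih, hsplit]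
          · simp [coreA, hcons, bGo, bTrans, hq, hs, hd, ih, hsplit]
        | false =>
          have ihr := ih false
          rw [hsplit] at ihr
          by_cases hs : c = ' '
          · subst hs
            cases hfd : bFindDot h with
            | none => simp [coreA, hcons, bGo, bFindDot, hd, ihr, hfd]
            | some j => simp [coreA, hcons, bGo, bFindDot, hd, ihr, hfd]
          · cases hfd : bFindDot h with
            | none => simp [coreA, hcons, bGo, bFindDot, hq, hd, hs, ihr, hfd]
            | some j => simp [coreA, hcons, bGo, bFindDot, hq, hd, hs, ihr, hfd]

-- ===== VERDICT (by name: the statement is the Claim_ definition above) =====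
theorem replace_spaces_and_dots_spec : Claim_equal_replace_spaces_and_dots := by
  intro sentence _
  unfold Spec_replace_spaces_and_dots replace_spaces_and_dots replace_spaces_and_dots_alt
  rw [replaceAGo_eq_core, coreA_eq_bGo]
  simp
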